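-- pv_equiv track=rewrite | github.com/chaviotics/In-Pre-Post-fix-Converter | In-Pre-Post-fix Converter.py | ifValid
-- ===== SOURCE A (Python) =====
-- def isOperand(char):
--   if char.isalpha():
--     return True
--
-- def isOperator(char):
--   if char in "+-/*^":
--     return True
--
-- def ifValid(expression):
--   open_par = close_par = 0
--   operator_together = operand_together = False
--
--   try:
--     for i in range(len(expression)):
--       if expression[i] == '(':
--         open_par += 1
--       elif expression[i] == ')':
--         close_par += 1
--
--       if isOperator(expression[i]):
--         if isOperator(expression[i+1]):
--           operator_together = True
--
--       if isOperand(expression[i]):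
--         if isOperand(expression[i+1]):
--           operand_together = True
--   except IndexError:
--     pass
--
--   if (open_par == close_par) and (not operator_together) and (not operand_together):
--     return True
--   return False
-- ===== SOURCE B (Python) =====
-- def isOperand(char):
--   if char.isalpha():
--     return True
--
-- def isOperator(char):
--   if char in "+-/*^":
--     return True
--
-- def ifValid(expression):
--   if expression.count('(') != expression.count(')'):
--     return False
--   if any(isOperator(a) and isOperator(b) for a, b in zip(expression, expression[1:])):
--     return False
--   if any(isOperand(a) and isOperand(b) for a, b in zip(expression, expression[1:])):
--     return False
--   return True
-- ===== Notes on version B (the rewrite author's own statement) =====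
-- stated objective: simpler
-- what changed: A's single stateful index loop with a try/except IndexError and four accumulators is replaced by three independent passes: two substring counts for the parentheses and two pairwise zip scans for adjacent operators/operands, each an early return.
import Mathlib
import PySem

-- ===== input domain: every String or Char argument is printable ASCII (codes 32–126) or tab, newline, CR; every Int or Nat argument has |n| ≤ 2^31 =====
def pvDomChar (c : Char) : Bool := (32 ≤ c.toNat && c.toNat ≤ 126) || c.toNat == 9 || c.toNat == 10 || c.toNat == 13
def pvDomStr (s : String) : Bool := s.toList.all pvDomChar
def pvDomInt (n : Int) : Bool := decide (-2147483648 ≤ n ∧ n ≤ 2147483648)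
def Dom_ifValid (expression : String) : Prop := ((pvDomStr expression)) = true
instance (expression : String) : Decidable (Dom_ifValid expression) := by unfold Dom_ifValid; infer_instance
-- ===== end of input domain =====

-- B replaces A's single stateful index loop (with try/except IndexError and four accumulators)
-- by three independent passes: two parenthesis counts and two pairwise adjacency scans. Objective: simpler.

-- ===== PORT A =====
-- isOperand(char): truthy iff char.isalpha() (exact on the ASCII domain)
def pyIsOperand (c : Char) : Bool := PySem.Chars.isalpha c

-- isOperator(char): truthy iff char in "+-/*^" (single char: substring test = membership)
def pyIsOperator (c : Char) : Bool := ("+-/*^".toList).contains c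

-- the 'for i in range(len(expression))' loop; expression[i+1] is the head of the remaining
-- list: 'none' is exactly Python's IndexError at i = len-1, which aborts the loop (caught by 'except')
def ifValidLoop : List Char → Int → Int → Bool → Bool → Int × Int × Bool × Bool
  | [], op, cl, ot, od => (op, cl, ot, od)
  | c :: rest, op, cl, ot, od =>
    let op' := if c = '(' then op + 1 else op
    let cl' := if c = '(' then cl else if c = ')' then cl + 1 else cl
    if pyIsOperator c then
      match rest.head? with
      | none => (op', cl', ot, od)            -- IndexError: loop aborted
      | some d =>
        let ot' := if pyIsOperator d then true else ot
        if pyIsOperand c then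
          match rest.head? with
          | none => (op', cl', ot', od)       -- IndexError: loop aborted
          | some d2 => ifValidLoop rest op' cl' ot' (if pyIsOperand d2 then true else od)
        else ifValidLoop rest op' cl' ot' od
    else
      if pyIsOperand c then
        match rest.head? with
        | none => (op', cl', ot, od)          -- IndexError: loop aborted
        | some d2 => ifValidLoop rest op' cl' ot (if pyIsOperand d2 then true else od)
      else ifValidLoop rest op' cl' ot od

def ifValid (expression : String) : Bool :=
  let r := ifValidLoop expression.toList 0 0 false false
  if r.1 = r.2.1 ∧ r.2.2.1 = false ∧ r.2.2.2 = false then true else false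

-- ===== PORT B =====
-- expression.count('(') with a one-character needle is exactly the number of occurrences of that
-- character, i.e. List.count on the code points; expression[1:] is PySem.List.slice _ (some 1) none.
def ifValid_alt (expression : String) : Bool :=
  let cs := expression.toList
  if cs.count '(' ≠ cs.count ')' then false
  else if (cs.zip (PySem.List.slice cs (some 1) none)).any
      (fun p => pyIsOperator p.1 && pyIsOperator p.2) then false
  else if (cs.zip (PySem.List.slice cs (some 1) none)).any
      (fun p => pyIsOperand p.1 && pyIsOperand p.2) then false
  else true

-- ===== PRECONDITION & SPEC =====
def Spec_ifValid (expression : String) (out : Bool) : Prop := out = ifValid_alt expression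
instance (expression : String) (out : Bool) : Decidable (Spec_ifValid expression out) := by unfold Spec_ifValid; infer_instance

-- ===== CLAIM (what is proved, stated in full; the proofs are below) =====
def Claim_equal_ifValid : Prop := ∀ (expression : String), Dom_ifValid expression → Spec_ifValid expression (ifValid expression)

-- ===== LEMMAS AND PROOFS =====

-- a character is never both an operator and an operand
lemma op_not_od (c : Char) (h : pyIsOperator c = true) : pyIsOperand c = false := by
  have hm : c ∈ ['+', '-', '/', '*', '^'] := by
    have h' : List.contains ['+', '-', '/', '*', '^'] c = true := h
    exact List.mem_of_elem_eq_true h'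
  fin_cases hm <;> decide

-- one loop iteration that sees a successor character: parens counted, both flags or-ed
lemma ifValidLoop_cons_cons (c d : Char) (rest : List Char) (op cl : Int) (ot od : Bool) :
    ifValidLoop (c :: d :: rest) op cl ot od =
      ifValidLoop (d :: rest)
        (if c = '(' then op + 1 else op)
        (if c = '(' then cl else if c = ')' then cl + 1 else cl)
        (ot || (pyIsOperator c && pyIsOperator d))
        (od || (pyIsOperand c && pyIsOperand d)) := by
  simp only [ifValidLoop, List.head?]
  by_cases h1 : pyIsOperator c
  · have h2 := op_not_od c h1
    simp [h1, h2]
    cases pyIsOperator d <;> cases ot <;> simp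
  · by_cases h2 : pyIsOperand c
    · simp [h1, h2]
      cases pyIsOperand d <;> cases od <;> simp
    · simp [h1, h2]

-- the final iteration: parens of the last character still counted, flags unchanged
-- (Python's IndexError on expression[i+1] aborts the loop after the paren counting)
lemma ifValidLoop_singleton (c : Char) (op cl : Int) (ot od : Bool) :
    ifValidLoop [c] op cl ot od =
      (if c = '(' then op + 1 else op,
       if c = '(' then cl else if c = ')' then cl + 1 else cl, ot, od) := by
  simp only [ifValidLoop, List.head?]
  by_cases h1 : pyIsOperator c <;> by_cases h2 : pyIsOperand c <;> simp [h1, h2]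

-- the loop computes both parenthesis counts and the two adjacency flags over
-- the zip of the string with its tail
lemma ifValidLoop_eq (cs : List Char) : ∀ (op cl : Int) (ot od : Bool),
    ifValidLoop cs op cl ot od =
      (op + cs.count '(', cl + cs.count ')',
       ot || (cs.zip cs.tail).any (fun p => pyIsOperator p.1 && pyIsOperator p.2),
       od || (cs.zip cs.tail).any (fun p => pyIsOperand p.1 && pyIsOperand p.2)) := by
  induction cs with
  | nil => intro op cl ot od; simp [ifValidLoop]
  | cons c rest ih =>
    intro op cl ot od
    cases rest with
    | nil =>
      rw [ifValidLoop_singleton]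
      simp only [List.count_cons, List.count_nil, List.tail_cons, List.zip_nil_right,
        List.any_nil, Bool.or_false, Prod.mk.injEq, beq_iff_eq]
      and_intros <;> first | trivial | (split_ifs <;> simp_all <;> try ring)
    | cons d rest' =>
      rw [ifValidLoop_cons_cons, ih]
      simp only [List.count_cons, List.tail_cons, List.zip_cons_cons, List.any_cons,
        Prod.mk.injEq, beq_iff_eq, Bool.or_assoc]
      and_intros <;> first | trivial | (split_ifs <;> simp_all <;> try ring)

-- ===== VERDICT (by name: the statement is the Claim_ definition above) =====
-- expression[1:] is the tail of the character list
lemma slice_one_none (l : List Char) : PySem.List.slice l (some 1) none = l.tail := by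
  simp [pysem, List.drop_one]

theorem ifValid_spec : Claim_equal_ifValid := by
  intro e _
  unfold Spec_ifValid ifValid ifValid_alt
  rw [ifValidLoop_eq]
  simp only [slice_one_none, zero_add, Bool.false_or, Nat.cast_inj, ne_eq]
  split_ifs <;> simp_all
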